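-- pv_equiv track=rewrite | github.com/nlbucurur/proyecto-programacion | ColumnarCipher.py | asignar_numero
-- ===== SOURCE A (Python) =====
-- def asignar_numero(palabra): #Le asigna un numero a cada letra de la palabra clave en orden alfabético
--     letras = "abcdefghijklmnopqrstuvwxyz"
--     numero = list(range(len(palabra)))
--     x = 0
--     for i in range(len(letras)):
--         for j in range(len(palabra)):
--             if letras[i] == palabra[j]:
--                 x += 1
--                 numero[j] = x
--     return numero
-- ===== SOURCE B (Python) =====
-- def asignar_numero(palabra):
--     # Closed-form ranks via a precomputed table plus one pass over the word:
--     # smaller[c] = how many letters of the word are strictly smaller than c;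
--     # a running occurrence dict then gives each letter position its rank
--     # smaller[c] + (occurrences of c so far); non-letter positions keep their index.
--     letras = "abcdefghijklmnopqrstuvwxyz"
--     smaller = {c: sum(1 for d in palabra if d in letras and d < c) for c in letras}
--     seen = {}
--     out = []
--     for j in range(len(palabra)):
--         c = palabra[j]
--         if c in letras:
--             seen[c] = seen.get(c, 0) + 1
--             out.append(smaller[c] + seen[c])
--         else:
--             out.append(j)
--     return out
-- ===== Notes on version B (the rewrite author's own statement) =====
-- stated objective: alternative
-- what changed: Replaced A's stateful double loop over the alphabet (a running counter x written into a mutated list) with a closed-form rank computed in one pass over the word: a precomputed table of how many letters are strictly smaller than each alphabet letter, plus a running occurrence dict for the tie-break; non-letter positions keep their index.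
import Mathlib
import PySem

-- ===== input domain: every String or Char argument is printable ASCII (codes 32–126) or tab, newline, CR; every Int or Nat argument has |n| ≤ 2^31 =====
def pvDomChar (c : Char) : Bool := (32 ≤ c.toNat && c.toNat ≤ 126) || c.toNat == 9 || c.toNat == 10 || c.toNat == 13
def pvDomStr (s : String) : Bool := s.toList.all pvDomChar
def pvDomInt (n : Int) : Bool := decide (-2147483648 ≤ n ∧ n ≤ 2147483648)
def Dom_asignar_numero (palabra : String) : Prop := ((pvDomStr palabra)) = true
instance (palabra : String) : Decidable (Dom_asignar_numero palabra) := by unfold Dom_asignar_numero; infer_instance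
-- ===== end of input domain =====

-- B replaces A's stateful double loop (running counter written into a mutated list)
-- by a per-position closed-form count; same return value, no speed claim.

-- ===== PORT A =====
-- literal transliteration of A: numero = list(range(len(palabra))); x = 0;
-- nested loops over the alphabet and the word mutating (numero, x).
def asignar_numero (palabra : String) : List Int :=
  let w := palabra.toList
  let letras := "abcdefghijklmnopqrstuvwxyz".toList
  let st := (List.range letras.length).foldl (fun (st : List Int × Int) i =>
      (List.range w.length).foldl (fun (st : List Int × Int) j =>
        if letras.getD i ' ' = w.getD j ' ' then (st.1.set j (st.2 + 1), st.2 + 1) else st) st)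
    ((List.range w.length).map (fun j => Int.ofNat j), 0)
  st.1

-- ===== PORT B =====
-- transliteration of Source B: smaller = {c: sum(1 for d in palabra if d in letras and d < c)
-- for c in letras} (dict built by the comprehension's fold), then one pass over the word
-- keeping a running occurrence dict 'seen' and appending to 'out'.
def asignar_numero_alt (palabra : String) : List Int :=
  let w := palabra.toList
  let letras := "abcdefghijklmnopqrstuvwxyz".toList
  let smaller : PySem.Dict Char Int :=
    letras.foldl (fun d c =>
      d.insert c (Int.ofNat (w.countP (fun e => decide (e ∈ letras ∧ e < c))))) PySem.Dict.empty
  let st := (List.range w.length).foldl (fun (st : PySem.Dict Char Int × List Int) j =>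
      if w.getD j ' ' ∈ letras then
        (st.1.insert (w.getD j ' ') (st.1.getD (w.getD j ' ') 0 + 1),
         st.2 ++ [smaller.getD (w.getD j ' ') 0 +
           (st.1.insert (w.getD j ' ') (st.1.getD (w.getD j ' ') 0 + 1)).getD (w.getD j ' ') 0])
      else (st.1, st.2 ++ [Int.ofNat j]))
    (PySem.Dict.empty, [])
  st.2

-- ===== PRECONDITION & SPEC =====
def Spec_asignar_numero (palabra : String) (out : List Int) : Prop := out = asignar_numero_alt palabra
instance (palabra : String) (out : List Int) : Decidable (Spec_asignar_numero palabra out) := by unfold Spec_asignar_numero; infer_instance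

-- ===== CLAIM (what is proved, stated in full; the proofs are below) =====
def Claim_equal_asignar_numero : Prop := ∀ (palabra : String), Dom_asignar_numero palabra → Spec_asignar_numero palabra (asignar_numero palabra)

-- ===== LEMMAS AND PROOFS =====

-- fold over range of indices with getD = fold over the list itself
theorem pvFoldl_range_getD {α β : Type} (l : List α) (d : α) (f : β → α → β) (b : β) :
    (List.range l.length).foldl (fun s i => f s (l.getD i d)) b = l.foldl f b := by
  induction l generalizing b with
  | nil => simp
  | cons a t ih =>
      simp only [List.length_cons, List.range_succ_eq_map, List.foldl_cons, List.foldl_map,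
        List.getD_cons_zero, List.getD_cons_succ]
      exact ih (f b a)

theorem pvSetMap (n m : Nat) (f : Nat → Int) (v : Int) (_hm : m < n) :
    ((List.range n).map f).set m v = (List.range n).map (fun j => if j = m then v else f j) := by
  apply List.ext_getElem
  · simp
  · intro i h1 h2
    simp only [List.length_set, List.length_map, List.length_range] at h1
    rw [List.getElem_set]
    simp only [List.getElem_map, List.getElem_range]
    by_cases h : m = i
    · subst h; simp
    · have h' : ¬ i = m := fun e => h e.symm
      simp [h, h']

theorem pvCountP_split {α : Type} (l : List α) (p q : α → Bool) (h : ∀ a, ¬(p a = true ∧ q a = true)) :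
    l.countP (fun a => p a || q a) = l.countP p + l.countP q := by
  induction l with
  | nil => simp
  | cons a t ih =>
      simp only [List.countP_cons, ih]
      have := h a
      cases hp : p a <;> cases hq : q a <;> simp [hp, hq] at this ⊢ <;> omega

-- the number A's counter assigns to position j of w while scanning letters ls in order
def pvRnk (w : List Char) : List Char → Char → Nat → Int
  | [], _, _ => 0
  | c :: rest, d, j => if d = c then ((w.take (j + 1)).count c : Int)
                       else (w.count c : Int) + pvRnk w rest d j

-- A's inner loop (one letter c, first m positions)
theorem pvInner (w : List Char) (c : Char) (g : Nat → Int) (x : Int) (m : Nat) (_hm : m ≤ w.length) :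
    (List.range m).foldl (fun (st : List Int × Int) j =>
        if c = w.getD j ' ' then (st.1.set j (st.2 + 1), st.2 + 1) else st)
      ((List.range w.length).map g, x)
    = ((List.range w.length).map (fun j =>
          if j < m ∧ c = w.getD j ' ' then x + ((w.take (j + 1)).count c : Int) else g j),
       x + ((w.take m).count c : Int)) := by
  induction m with
  | zero => simp
  | succ m ih =>
      have hmlt : m < w.length := by omega
      have hgd : w.getD m ' ' = w[m] := List.getD_eq_getElem w ' ' hmlt
      have htake : w.take (m + 1) = w.take m ++ [w[m]] := by
        rw [List.take_add_one, List.getElem?_eq_getElem hmlt]; rfl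
      rw [List.range_succ, List.foldl_append, ih (by omega)]
      simp only [List.foldl_cons, List.foldl_nil]
      by_cases hc : c = w.getD m ' '
      · rw [if_pos hc]
        have hcount : (w.take (m + 1)).count c = (w.take m).count c + 1 := by
          rw [htake, List.count_append]
          simp [hgd ▸ hc]
        rw [pvSetMap _ _ _ _ hmlt]
        simp only [Prod.mk.injEq]
        refine ⟨List.map_congr_left ?_, by rw [hcount]; push_cast; ring⟩
        intro j hj
        simp only [List.mem_range] at hj
        by_cases hjm : j = m
        · subst hjm
          rw [if_pos rfl, if_pos ⟨by omega, hc⟩, hcount]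
          push_cast; ring
        · rw [if_neg hjm]
          by_cases h1 : j < m ∧ c = w.getD j ' '
          · rw [if_pos h1, if_pos ⟨by omega, h1.2⟩]
          · have h2 : ¬ (j < m + 1 ∧ c = w.getD j ' ') := by
              rintro ⟨ha, hb⟩; exact h1 ⟨by omega, hb⟩
            rw [if_neg h1, if_neg h2]
      · rw [if_neg hc]
        have hcount : (w.take (m + 1)).count c = (w.take m).count c := by
          rw [htake, List.count_append]
          have : w[m] ≠ c := fun e => hc (hgd ▸ e.symm)
          simp [this]
        simp only [Prod.mk.injEq]
        refine ⟨List.map_congr_left ?_, by rw [hcount]⟩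
        intro j hj
        simp only [List.mem_range] at hj
        by_cases h1 : j < m ∧ c = w.getD j ' '
        · rw [if_pos h1, if_pos ⟨by omega, h1.2⟩]
        · have h2 : ¬ (j < m + 1 ∧ c = w.getD j ' ') := by
            rintro ⟨ha, hb⟩
            rcases Nat.lt_succ_iff_lt_or_eq.mp ha with h | h
            · exact h1 ⟨h, hb⟩
            · exact hc (h ▸ hb)
          rw [if_neg h1, if_neg h2]

-- A's outer loop over a nodup letter list ls
theorem pvOuter (w : List Char) (ls : List Char) (hnd : ls.Nodup) (g : Nat → Int) (x : Int) :
    ls.foldl (fun (st : List Int × Int) c =>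
        (List.range w.length).foldl (fun (st : List Int × Int) j =>
          if c = w.getD j ' ' then (st.1.set j (st.2 + 1), st.2 + 1) else st) st)
      ((List.range w.length).map g, x)
    = ((List.range w.length).map (fun j =>
          if w.getD j ' ' ∈ ls then x + pvRnk w ls (w.getD j ' ') j else g j),
       x + (ls.map (fun c => (w.count c : Int))).sum) := by
  induction ls generalizing g x with
  | nil => simp
  | cons c rest ih =>
      obtain ⟨hcr, hrest⟩ := List.nodup_cons.mp hnd
      rw [List.foldl_cons, pvInner w c g x w.length le_rfl, ih hrest]
      simp only [List.take_length, Prod.mk.injEq]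
      constructor
      · apply List.map_congr_left
        intro j hj
        simp only [List.mem_range] at hj
        by_cases h1 : w.getD j ' ' ∈ rest
        · have hne : w.getD j ' ' ≠ c := fun e => hcr (e ▸ h1)
          rw [if_pos h1, if_pos (List.mem_cons.mpr (Or.inr h1))]
          rw [pvRnk, if_neg hne]
          ring
        · rw [if_neg h1]
          by_cases h2 : w.getD j ' ' = c
          · rw [if_pos ⟨by omega, h2.symm⟩, if_pos (List.mem_cons.mpr (Or.inl h2))]
            rw [pvRnk, if_pos h2]
          · have : w.getD j ' ' ∉ c :: rest := by
              simp only [List.mem_cons]; rintro (h | h); exact h2 h; exact h1 h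
            rw [if_neg this, if_neg (by rintro ⟨_, hb⟩; exact h2 hb.symm)]
      · simp only [List.map_cons, List.sum_cons]
        ring

-- for a strictly sorted ls, pvRnk is B's closed form
theorem pvRnk_eq (w : List Char) (S : List Char) (hs : S.Pairwise (· < ·)) (d : Char)
    (hd : d ∈ S) (j : Nat) :
    pvRnk w S d j = (w.countP (fun e => decide (e ∈ S ∧ e < d)) : Int)
      + ((w.take (j + 1)).count d : Int) := by
  induction S with
  | nil => cases hd
  | cons c rest ih =>
      obtain ⟨hlt, hrest⟩ := List.pairwise_cons.mp hs
      by_cases h : d = c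
      · subst h
        have h0 : w.countP (fun e => decide (e ∈ d :: rest ∧ e < d)) = 0 := by
          rw [List.countP_eq_zero]
          intro a _
          simp only [decide_eq_true_eq, List.mem_cons, not_and]
          rintro (rfl | hmem)
          · exact lt_irrefl a
          · exact fun hlt2 => absurd hlt2 (not_lt.mpr (le_of_lt (hlt a hmem)))
        rw [pvRnk, if_pos rfl, h0]
        simp
      · have hd' : d ∈ rest := by
          rcases List.mem_cons.mp hd with h' | h'
          · exact absurd h' h
          · exact h'
        have hcd : c < d := hlt d hd'
        have hsplit : w.countP (fun e => decide (e ∈ c :: rest ∧ e < d))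
            = w.countP (fun e => e == c) + w.countP (fun e => decide (e ∈ rest ∧ e < d)) := by
          rw [← pvCountP_split w (fun e => e == c) (fun e => decide (e ∈ rest ∧ e < d))
            (by intro a hab
                have ha : a = c := by simpa using hab.1
                have : a ∈ rest ∧ a < d := by simpa using hab.2
                exact absurd (hlt a this.1) (by rw [ha]; exact lt_irrefl c))]
          apply List.countP_congr
          intro a _
          simp only [List.mem_cons, decide_eq_true_eq, Bool.or_eq_true, beq_iff_eq]
          constructor
          · rintro ⟨rfl | hm, hl⟩
            · exact Or.inl rfl
            · exact Or.inr (by simp [hm, hl])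
          · rintro (rfl | hm)
            · exact ⟨Or.inl rfl, hcd⟩
            · have : a ∈ rest ∧ a < d := by simpa using hm
              exact ⟨Or.inr this.1, this.2⟩
        have hcnt : w.countP (fun e => e == c) = w.count c := rfl
        rw [pvRnk, if_neg h, ih hrest hd', hsplit, hcnt]
        push_cast
        ring


-- dict built by a fold of inserts with key-independent values: lookups
theorem pvGetD_foldl_insert_not_mem (ls : List Char) (f : Char → Int) (d : PySem.Dict Char Int)
    (c : Char) (hc : c ∉ ls) :
    (ls.foldl (fun d x => d.insert x (f x)) d).getD c 0 = d.getD c 0 := by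
  induction ls generalizing d with
  | nil => rfl
  | cons x t ih =>
      rw [List.foldl_cons, ih _ (fun h => hc (List.mem_cons.mpr (Or.inr h)))]
      exact PySem.Dict.getD_insert_of_ne _ _ _ (fun h => hc (List.mem_cons.mpr (Or.inl h)))

theorem pvGetD_foldl_insert_mem (ls : List Char) (f : Char → Int) (d : PySem.Dict Char Int)
    (c : Char) (hnd : ls.Nodup) (hc : c ∈ ls) :
    (ls.foldl (fun d x => d.insert x (f x)) d).getD c 0 = f c := by
  induction ls generalizing d with
  | nil => cases hc
  | cons x t ih =>
      obtain ⟨hxt, hndt⟩ := List.nodup_cons.mp hnd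
      rw [List.foldl_cons]
      by_cases h : c ∈ t
      · exact ih _ hndt h
      · have hcx : c = x := by
          rcases List.mem_cons.mp hc with h' | h'
          · exact h'
          · exact absurd h' h
        subst hcx
        rw [pvGetD_foldl_insert_not_mem t f _ c h]
        exact PySem.Dict.getD_insert_self _ _ _ _

-- B's main loop: the output is the per-position closed form, and 'seen' counts letters
theorem pvAltLoop (w : List Char) (ls : List Char) (sm : PySem.Dict Char Int)
    (m : Nat) (hm : m ≤ w.length) :
    ((List.range m).foldl (fun (st : PySem.Dict Char Int × List Int) j =>
        if w.getD j ' ' ∈ ls then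
          (st.1.insert (w.getD j ' ') (st.1.getD (w.getD j ' ') 0 + 1),
           st.2 ++ [sm.getD (w.getD j ' ') 0 +
             (st.1.insert (w.getD j ' ') (st.1.getD (w.getD j ' ') 0 + 1)).getD (w.getD j ' ') 0])
        else (st.1, st.2 ++ [Int.ofNat j]))
      (PySem.Dict.empty, [])).2
      = (List.range m).map (fun j =>
          if w.getD j ' ' ∈ ls then
            sm.getD (w.getD j ' ') 0 + ((w.take (j + 1)).count (w.getD j ' ') : Int)
          else Int.ofNat j)
    ∧ ∀ c ∈ ls,
      ((List.range m).foldl (fun (st : PySem.Dict Char Int × List Int) j =>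
        if w.getD j ' ' ∈ ls then
          (st.1.insert (w.getD j ' ') (st.1.getD (w.getD j ' ') 0 + 1),
           st.2 ++ [sm.getD (w.getD j ' ') 0 +
             (st.1.insert (w.getD j ' ') (st.1.getD (w.getD j ' ') 0 + 1)).getD (w.getD j ' ') 0])
        else (st.1, st.2 ++ [Int.ofNat j]))
      (PySem.Dict.empty, [])).1.getD c 0 = ((w.take m).count c : Int) := by
  induction m with
  | zero => exact ⟨rfl, fun c _ => by simp [PySem.Dict.getD_empty]⟩
  | succ m ih =>
      obtain ⟨ih1, ih2⟩ := ih (by omega)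
      have hmlt : m < w.length := by omega
      have hgd : w.getD m ' ' = w[m] := List.getD_eq_getElem w ' ' hmlt
      have htake : w.take (m + 1) = w.take m ++ [w[m]] := by
        rw [List.take_add_one, List.getElem?_eq_getElem hmlt]; rfl
      rw [List.range_succ, List.foldl_append, List.foldl_cons, List.foldl_nil,
        List.map_append, List.map_cons, List.map_nil]
      by_cases hc : w.getD m ' ' ∈ ls
      · rw [if_pos hc, if_pos hc]
        constructor
        · rw [ih1, PySem.Dict.getD_insert_self, ih2 _ hc]
          have : (w.take (m + 1)).count (w.getD m ' ') = (w.take m).count (w.getD m ' ') + 1 := by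
            rw [htake, List.count_append, hgd]; simp
          rw [this]
          push_cast
          ring_nf
        · intro c' hc'
          rw [PySem.Dict.getD_insert]
          by_cases h : c' = w.getD m ' '
          · rw [if_pos h, h, ih2 _ hc]
            have : (w.take (m + 1)).count (w.getD m ' ') = (w.take m).count (w.getD m ' ') + 1 := by
              rw [htake, List.count_append, hgd]; simp
            rw [this]; push_cast; ring
          · rw [if_neg h, ih2 _ hc']
            have : (w.take (m + 1)).count c' = (w.take m).count c' := by
              rw [htake, List.count_append]
              have : w[m] ≠ c' := fun e => h (by rw [hgd, e])
              simp [this]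
            rw [this]
      · rw [if_neg hc, if_neg hc]
        refine ⟨by rw [ih1], ?_⟩
        intro c' hc'
        rw [ih2 _ hc']
        have : (w.take (m + 1)).count c' = (w.take m).count c' := by
          rw [htake, List.count_append]
          have : w[m] ≠ c' := fun e => hc (by rw [hgd, e]; exact hc')
          simp [this]
        rw [this]

-- ===== VERDICT (by name: the statement is the Claim_ definition above) =====
theorem asignar_numero_spec : Claim_equal_asignar_numero := by
  intro palabra _
  unfold Spec_asignar_numero
  show asignar_numero palabra = asignar_numero_alt palabra
  simp only [asignar_numero, asignar_numero_alt]
  rw [pvFoldl_range_getD ("abcdefghijklmnopqrstuvwxyz".toList) ' '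
    (fun (st : List Int × Int) c =>
      (List.range palabra.toList.length).foldl (fun (st : List Int × Int) j =>
        if c = palabra.toList.getD j ' ' then (st.1.set j (st.2 + 1), st.2 + 1) else st) st)
    ((List.range palabra.toList.length).map (fun j => Int.ofNat j), 0)]
  rw [pvOuter palabra.toList ("abcdefghijklmnopqrstuvwxyz".toList) (by decide)
    (fun j => Int.ofNat j) 0]
  rw [(pvAltLoop palabra.toList ("abcdefghijklmnopqrstuvwxyz".toList)
    (("abcdefghijklmnopqrstuvwxyz".toList).foldl (fun d c =>
      d.insert c (Int.ofNat (palabra.toList.countP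
        (fun e => decide (e ∈ "abcdefghijklmnopqrstuvwxyz".toList ∧ e < c))))) PySem.Dict.empty)
    palabra.toList.length le_rfl).1]
  apply List.map_congr_left
  intro j hj
  simp only [List.mem_range] at hj
  by_cases hmem : palabra.toList.getD j ' ' ∈ "abcdefghijklmnopqrstuvwxyz".toList
  · rw [if_pos hmem, if_pos hmem,
      pvRnk_eq palabra.toList ("abcdefghijklmnopqrstuvwxyz".toList) (by decide) _ hmem j,
      pvGetD_foldl_insert_mem _ _ _ _ (by decide) hmem]
    simp only [Int.ofNat_eq_natCast]
    ring
  · rw [if_neg hmem, if_neg hmem]
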